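-- pv_equiv track=rewrite | github.com/CodingCodingK/mas-pipeline | src/agent/compact.py | micro_compact
-- ===== SOURCE A (Python) =====
-- def micro_compact(messages: list[dict], keep_recent: int = 5) -> list[dict]:
--     """Clear old tool-result content, keeping recent ones intact.
--
--     Two protection layers (aligned with Claude Code's micro-compact design):
--     1. **Current-turn shield**: all tool results after the last assistant
--        message are unconditionally preserved — the LLM that issued those
--        tool calls has never seen the results yet; clearing them would cause
--        information loss or redundant re-calls.
--     2. **keep_recent budget**: among the *older* tool results (before the
--        last assistant message), keep the N most recent intact; clear the rest.
--
--     Modifies messages in-place and returns the same list.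
--     """
--     # Find the last assistant message index — everything after it belongs
--     # to the current turn and must not be touched.
--     last_assistant_idx = -1
--     for i in range(len(messages) - 1, -1, -1):
--         if messages[i].get("role") == "assistant":
--             last_assistant_idx = i
--             break
--
--     # Collect tool-result indices that are BEFORE the last assistant msg
--     # (i.e. from completed prior turns only).
--     older_tool_indices = [
--         i for i, msg in enumerate(messages)
--         if msg.get("role") == "tool" and i < last_assistant_idx
--     ]
--
--     if len(older_tool_indices) <= keep_recent:
--         return messages
--
--     to_clear = older_tool_indices[: len(older_tool_indices) - keep_recent]
--     for idx in to_clear: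
--         if messages[idx].get("content") != "[Old tool result cleared]":
--             messages[idx] = {**messages[idx], "content": "[Old tool result cleared]"}
--
--     return messages
-- ===== SOURCE B (Python) =====
-- CLEARED = "[Old tool result cleared]"
--
-- def micro_compact(messages: list[dict], keep_recent: int = 5) -> list[dict]:
--     """Single reverse pass: skip the current turn (everything at or after the
--     last assistant message), then keep the first keep_recent tool results seen
--     (the most recent older ones) and clear every earlier one.
--
--     Modifies messages in-place and returns the same list.
--     """
--     seen_assistant = False
--     tools_kept = 0
--     for i in range(len(messages) - 1, -1, -1):
--         msg = messages[i]
--         if not seen_assistant: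
--             if msg.get("role") == "assistant":
--                 seen_assistant = True
--             continue
--         if msg.get("role") == "tool":
--             if tools_kept < keep_recent:
--                 tools_kept += 1
--             elif msg.get("content") != CLEARED:
--                 messages[i] = {**msg, "content": CLEARED}
--     return messages
-- ===== Notes on version B (the rewrite author's own statement) =====
-- stated objective: alternative
-- what changed: A scans backwards for the last assistant, builds the list of older tool indices by a full enumerate pass, slices off the ones to clear and patches them by index; B is a single reverse pass with two state variables (assistant-seen flag and a kept-tools counter) that clears in place, never materialising index lists or slices.
import Mathlib
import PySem

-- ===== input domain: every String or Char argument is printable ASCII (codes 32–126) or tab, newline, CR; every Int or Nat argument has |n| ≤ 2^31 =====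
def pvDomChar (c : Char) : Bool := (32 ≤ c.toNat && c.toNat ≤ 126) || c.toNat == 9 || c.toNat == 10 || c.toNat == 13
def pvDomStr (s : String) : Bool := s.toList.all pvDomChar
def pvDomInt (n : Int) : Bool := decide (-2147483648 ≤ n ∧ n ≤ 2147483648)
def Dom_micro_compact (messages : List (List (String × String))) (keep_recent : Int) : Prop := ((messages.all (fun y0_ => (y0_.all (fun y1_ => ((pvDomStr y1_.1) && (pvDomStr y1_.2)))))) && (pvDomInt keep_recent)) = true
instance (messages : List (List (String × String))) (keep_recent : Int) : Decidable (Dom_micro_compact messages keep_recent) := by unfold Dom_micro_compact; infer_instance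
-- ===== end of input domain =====

-- B re-decomposes A's four phases (find last assistant, enumerate+filter older tool indices,
-- slice, patch by index) into one reverse pass with a seen-flag and a kept-tools counter.
-- Both Pythons mutate `messages` in place and return the same list; the theorems are about the
-- returned value (which is the whole mutated list, so the observable effect coincides too).

-- ===== PORT A =====
-- msg.get(k) on a Python dict, and {**msg, "content": "[Old tool result cleared]"}
def pvGet (m : List (String × String)) (k : String) : Option String :=
  (PySem.Dict.mk m).get? k

def pvClear (m : List (String × String)) : List (String × String) :=
  ((PySem.Dict.mk m).insert "content" "[Old tool result cleared]").items

-- "for i in range(len(messages)-1,-1,-1): if messages[i].get('role')=='assistant': idx=i; break"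
def lastAsstLoop (messages : List (List (String × String))) : List Int → Int
  | [] => -1
  | i :: rest =>
    match PySem.List.pyGet? messages i with
    | some m => if pvGet m "role" = some "assistant" then i else lastAsstLoop messages rest
    | none => lastAsstLoop messages rest   -- unreachable: every index of the range is in bounds

-- loop body of "for idx in to_clear: ..."
def clearStep (acc : List (List (String × String))) (idx : Int) : List (List (String × String)) :=
  match PySem.List.pyGet? acc idx with
  | some m =>
    if pvGet m "content" ≠ some "[Old tool result cleared]"
    then PySem.List.pySetD acc idx (pvClear m)
    else acc
  | none => acc   -- unreachable: every idx of to_clear is in bounds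

def micro_compact (messages : List (List (String × String))) (keep_recent : Int) : List (List (String × String)) :=
  let last_assistant_idx : Int :=
    lastAsstLoop messages (PySem.List.pyRange ((messages.length : Int) - 1) (-1) (-1))
  let older_tool_indices : List Int :=
    ((PySem.List.enumerate messages).filter
      (fun p => pvGet p.2 "role" == some "tool" && decide (p.1 < last_assistant_idx))).map (·.1)
  if (older_tool_indices.length : Int) ≤ keep_recent then messages
  else
    let to_clear := PySem.List.slice older_tool_indices none
      (some ((older_tool_indices.length : Int) - keep_recent))
    to_clear.foldl clearStep messages

-- ===== PORT B =====
-- reverse pass: the tail (later messages) is processed first; state = (result, seen_assistant, tools_kept)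
def altGo (keep_recent : Int) : List (List (String × String)) → List (List (String × String)) × Bool × Int
  | [] => ([], false, 0)
  | m :: rest =>
    let r := altGo keep_recent rest
    if !r.2.1 then
      (m :: r.1, pvGet m "role" == some "assistant", r.2.2)
    else if pvGet m "role" == some "tool" then
      if r.2.2 < keep_recent then (m :: r.1, r.2.1, r.2.2 + 1)
      else if pvGet m "content" != some "[Old tool result cleared]" then (pvClear m :: r.1, r.2.1, r.2.2)
      else (m :: r.1, r.2.1, r.2.2)
    else (m :: r.1, r.2.1, r.2.2)

def micro_compact_alt (messages : List (List (String × String))) (keep_recent : Int) : List (List (String × String)) :=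
  (altGo keep_recent messages).1

-- ===== PRECONDITION & SPEC =====
def Spec_micro_compact (messages : List (List (String × String))) (keep_recent : Int) (out : List (List (String × String))) : Prop := out = micro_compact_alt messages keep_recent
instance (messages : List (List (String × String))) (keep_recent : Int) (out : List (List (String × String))) : Decidable (Spec_micro_compact messages keep_recent out) := by unfold Spec_micro_compact; infer_instance

-- ===== CLAIM (what is proved, stated in full; the proofs are below) =====
def Claim_equal_micro_compact : Prop := ∀ (messages : List (List (String × String))) (keep_recent : Int), Dom_micro_compact messages keep_recent → Spec_micro_compact messages keep_recent (micro_compact messages keep_recent)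

-- ===== LEMMAS AND PROOFS =====

-- common specification: clear m iff some later message is an assistant, m is a tool message,
-- at least keep_recent tool messages lie strictly between m and that last assistant,
-- and m's content is not already the sentinel
def isRole (m : List (String × String)) (r : String) : Bool := pvGet m "role" == some r

def hasAsst (xs : List (List (String × String))) : Bool := xs.any (fun m => isRole m "assistant")

-- number of tool messages strictly before the last assistant message
def fcount : List (List (String × String)) → Nat
  | [] => 0
  | m :: rest => if hasAsst rest then fcount rest + (if isRole m "tool" then 1 else 0) else 0

-- index of the last assistant message, -1 if none
def specLast : List (List (String × String)) → Int
  | [] => -1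
  | m :: rest => if hasAsst rest then specLast rest + 1 else if isRole m "assistant" then 0 else -1

def clearCond (k : Int) (m : List (String × String)) (rest : List (List (String × String))) : Bool :=
  hasAsst rest && isRole m "tool" && decide (k ≤ (fcount rest : Int)) &&
    (pvGet m "content" != some "[Old tool result cleared]")

def S (k : Int) : List (List (String × String)) → List (List (String × String))
  | [] => []
  | m :: rest => (if clearCond k m rest then pvClear m else m) :: S k rest

-- the older-tool-index list, threshold L, start index s
def G (L : Int) : List (List (String × String)) → Int → List Int
  | [], _ => []
  | m :: rest, s => if isRole m "tool" && decide (s < L) then s :: G L rest (s + 1) else G L rest (s + 1)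

-- ---- B = S ----
theorem fcount_eq_zero (xs : List (List (String × String))) (h : hasAsst xs = false) : fcount xs = 0 := by
  cases xs with
  | nil => rfl
  | cons m rest =>
    simp only [hasAsst, List.any_cons, Bool.or_eq_false_iff] at h
    simp [fcount, hasAsst, h.2]

theorem altGo_eq (k : Int) (xs : List (List (String × String))) :
    altGo k xs = (S k xs, hasAsst xs, min ((fcount xs : Int)) (max k 0)) := by
  induction xs with
  | nil => simp [altGo, S, hasAsst, fcount]
  | cons m rest ih =>
    have hcons : hasAsst (m :: rest) = (isRole m "assistant" || hasAsst rest) := by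
      simp [hasAsst, isRole]
    simp only [altGo, ih]
    by_cases hr : hasAsst rest = true
    · have hA : hasAsst (m :: rest) = true := by simp [hcons, hr]
      simp only [hr, Bool.not_true, Bool.false_eq_true, if_false]
      by_cases ht : isRole m "tool" = true
      · have ht' : (pvGet m "role" == some "tool") = true := ht
        simp only [ht', if_true]
        have hf : (0:Int) ≤ (fcount rest : Int) := by positivity
        have hfc : fcount (m :: rest) = fcount rest + 1 := by simp [fcount, hr, ht]
        by_cases hk : min ((fcount rest : Int)) (max k 0) < k
        · rw [if_pos hk]
          have hlt : ¬ (k ≤ (fcount rest : Int)) := by omega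
          simp only [S, clearCond, hr, ht, Bool.true_and, if_pos hr, hlt, decide_false,
            Bool.false_and, Bool.if_false_left, hA, hfc, Prod.mk.injEq, Bool.not_eq_true]
          refine ⟨by simp, ?_⟩
          simp only [Int.min_def, Int.max_def] at hk ⊢
          split_ifs at hk ⊢ <;> exact ⟨trivial, by push_cast at *; omega⟩
        · rw [if_neg hk]
          have hge : k ≤ (fcount rest : Int) := by omega
          have h3 : min ((fcount rest : Int)) (max k 0) = min (((fcount rest + 1 : Nat)) : Int) (max k 0) := by
            push_cast; omega
          simp only [S, clearCond, hr, ht, Bool.true_and, if_pos hr,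
            decide_eq_true hge, Bool.and_true, hA, hfc, Prod.mk.injEq, ← h3]
          by_cases hg : (pvGet m "content" != some "[Old tool result cleared]") = true
          · simp [hg]
          · simp only [Bool.not_eq_true] at hg
            simp [hg]
      · have ht' : (pvGet m "role" == some "tool") = false := by simpa [isRole] using ht
        have htf : isRole m "tool" = false := by simpa using ht
        have hfc : fcount (m :: rest) = fcount rest := by simp [fcount, hr, htf]
        simp [ht', S, clearCond, htf, hA, hfc]
    · simp only [Bool.not_eq_true] at hr
      have h0 : fcount rest = 0 := fcount_eq_zero rest hr
      have h0' : fcount (m :: rest) = 0 := by simp [fcount, hr]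
      simp only [hr, Bool.not_false, if_true, S, clearCond, Bool.false_and,
        Bool.if_false_left, h0, h0', Prod.mk.injEq]
      exact ⟨by simp [hr], by simp [hcons, hr, isRole], by simp⟩

theorem B_eq_S (xs : List (List (String × String))) (k : Int) : micro_compact_alt xs k = S k xs := by
  simp [micro_compact_alt, altGo_eq]

-- ---- specLast facts ----
theorem specLast_nonneg (xs : List (List (String × String))) (h : hasAsst xs = true) : 0 ≤ specLast xs := by
  induction xs with
  | nil => simp [hasAsst] at h
  | cons m rest ih =>
    by_cases hr : hasAsst rest = true
    · have := ih hr
      simp only [specLast, hr, if_true]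
      omega
    · simp only [Bool.not_eq_true] at hr
      simp only [hasAsst, List.any_cons] at h
      have hm : isRole m "assistant" = true := by
        rcases Bool.or_eq_true_iff.mp h with h1 | h1
        · exact h1
        · rw [show (rest.any fun m => isRole m "assistant") = hasAsst rest from rfl, hr] at h1
          cases h1
      simp [specLast, hr, hm]

theorem specLast_neg (xs : List (List (String × String))) (h : hasAsst xs = false) : specLast xs = -1 := by
  cases xs with
  | nil => rfl
  | cons m rest =>
    simp only [hasAsst, List.any_cons, Bool.or_eq_false_iff] at h
    have hr : hasAsst rest = false := h.2
    simp [specLast, hr, h.1]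

theorem hasAsst_of_drop (xs : List (List (String × String))) (d : Nat) (h : hasAsst (xs.drop d) = true) :
    hasAsst xs = true := by
  simp only [hasAsst, List.any_eq_true] at *
  obtain ⟨x, hx, hp⟩ := h
  exact ⟨x, List.mem_of_mem_drop hx, hp⟩

theorem specLast_drop (d : Nat) (xs : List (List (String × String))) (h : hasAsst (xs.drop d) = true) :
    specLast xs = d + specLast (xs.drop d) := by
  induction d generalizing xs with
  | zero => simp
  | succ d ih =>
    cases xs with
    | nil => simp [hasAsst] at h
    | cons m rest =>
      rw [List.drop_succ_cons] at h ⊢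
      have hr : hasAsst rest = true := hasAsst_of_drop rest d h
      have := ih rest h
      simp only [specLast, hr, if_true]
      push_cast
      omega

theorem specLast_lt (d : Nat) (xs : List (List (String × String))) (h : hasAsst (xs.drop d) = false) :
    specLast xs < d := by
  induction d generalizing xs with
  | zero =>
    rw [List.drop_zero] at h
    rw [specLast_neg xs h]
    omega
  | succ d ih =>
    cases xs with
    | nil => simp [specLast]
    | cons m rest =>
      rw [List.drop_succ_cons] at h
      have := ih rest h
      by_cases hr : hasAsst rest = true
      · simp only [specLast, hr, if_true]
        push_cast
        omega
      · simp only [Bool.not_eq_true] at hr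
        simp only [specLast, hr, Bool.false_eq_true, if_false]
        split <;> push_cast <;> omega

theorem hasAsst_drop_iff (xs : List (List (String × String))) (j : Nat) :
    hasAsst (xs.drop (j + 1)) = true ↔ (j : Int) < specLast xs := by
  constructor
  · intro h
    have h1 := specLast_drop (j + 1) xs h
    have h2 := specLast_nonneg _ h
    omega
  · intro h
    by_contra hc
    have := specLast_lt (j + 1) xs (Bool.eq_false_iff.mpr hc)
    omega

-- ---- A's backward loop computes specLast ----
theorem loop_congr (r : List Int) (xs : List (List (String × String))) (m : List (String × String))
    (h : ∀ i ∈ r, 0 ≤ i ∧ i < (xs.length : Int)) :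
    lastAsstLoop (xs ++ [m]) r = lastAsstLoop xs r := by
  induction r with
  | nil => rfl
  | cons i rest ih =>
    have hi := h i (by simp)
    have hrest : ∀ j ∈ rest, 0 ≤ j ∧ j < (xs.length : Int) := fun j hj => h j (by simp [hj])
    have hget : PySem.List.pyGet? (xs ++ [m]) i = PySem.List.pyGet? xs i := by
      rw [PySem.List.pyGet?_of_nonneg (xs ++ [m]) hi.1, PySem.List.pyGet?_of_nonneg xs hi.1]
      exact List.getElem?_append_left (by omega)
    simp only [lastAsstLoop, hget]
    cases hg : PySem.List.pyGet? xs i with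
    | none => exact ih hrest
    | some mm =>
      by_cases hc : pvGet mm "role" = some "assistant"
      · simp [hc]
      · simp only [hc, if_neg hc]
        exact ih hrest

theorem specLast_append (xs : List (List (String × String))) (m : List (String × String)) :
    specLast (xs ++ [m]) = if isRole m "assistant" then (xs.length : Int) else specLast xs := by
  induction xs with
  | nil =>
    simp only [List.nil_append, specLast, hasAsst, List.any_nil, Bool.false_eq_true, if_false,
      List.length_nil]
    split <;> simp [specLast]
  | cons x xs ih =>
    have hA : hasAsst (xs ++ [m]) = (hasAsst xs || isRole m "assistant") := by
      simp [hasAsst]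
    by_cases hm : isRole m "assistant" = true
    · have h1 : hasAsst (xs ++ [m]) = true := by simp [hA, hm]
      simp only [List.cons_append, specLast, h1, if_true, ih, hm, if_true, List.length_cons]
      push_cast
      omega
    · have hm' : isRole m "assistant" = false := by simpa using hm
      have h1 : hasAsst (xs ++ [m]) = hasAsst xs := by simp [hA, hm']
      simp only [List.cons_append, specLast, h1, ih, hm', Bool.false_eq_true, if_false]

theorem lastLoop_eq (xs : List (List (String × String))) :
    lastAsstLoop xs (PySem.List.pyRange ((xs.length : Int) - 1) (-1) (-1)) = specLast xs := by
  induction xs using List.reverseRecOn with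
  | nil =>
    rw [PySem.List.pyRange_neg_one_eq_nil (by simp)]
    rfl
  | append_singleton xs m ih =>
    have hlen : ((xs ++ [m]).length : Int) - 1 = (xs.length : Int) := by simp
    rw [hlen, PySem.List.pyRange_neg_one_cons (by omega)]
    have hget : PySem.List.pyGet? (xs ++ [m]) (xs.length : Int) = some m := by
      rw [PySem.List.pyGet?_of_nonneg (xs ++ [m]) (by positivity)]
      simp
    simp only [lastAsstLoop, hget]
    by_cases hc : pvGet m "role" = some "assistant"
    · have hm : isRole m "assistant" = true := by simp [isRole, hc]
      rw [if_pos hc, specLast_append, if_pos hm]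
    · have hm : isRole m "assistant" = false := by simp [isRole, hc]
      rw [if_neg hc, specLast_append, hm, if_neg (by simp)]
      rw [loop_congr _ xs m (fun i hi => ?_), ih]
      rw [PySem.List.mem_pyRange_neg_one] at hi
      omega

-- ---- the enumerate/filter/map comprehension is G ----
theorem enum_filter_eq_G (L : Int) (xs : List (List (String × String))) (s : Int) :
    ((PySem.List.enumerate xs s).filter
      (fun p => pvGet p.2 "role" == some "tool" && decide (p.1 < L))).map (·.1) = G L xs s := by
  induction xs generalizing s with
  | nil => simp [PySem.List.enumerate_nil, G]
  | cons m rest ih =>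
    rw [PySem.List.enumerate_cons]
    simp only [List.filter_cons]
    by_cases hc : (pvGet m "role" == some "tool" && decide (s < L)) = true
    · simp only [hc, if_true, List.map_cons, ih, G]
      rw [if_pos (by simpa [isRole] using hc)]
    · simp only [hc, Bool.false_eq_true, if_false, ih, G]
      rw [if_neg (by simpa [isRole] using hc)]

-- ---- G facts ----
theorem G_ge (L : Int) (xs : List (List (String × String))) (s : Int) : ∀ i ∈ G L xs s, s ≤ i := by
  induction xs generalizing s with
  | nil => simp [G]
  | cons m rest ih =>
    intro i hi
    simp only [G] at hi
    split at hi
    · rcases List.mem_cons.mp hi with rfl | hi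
      · omega
      · have := ih (s + 1) i hi; omega
    · have := ih (s + 1) i hi; omega

theorem G_pairwise (L : Int) (xs : List (List (String × String))) (s : Int) :
    (G L xs s).Pairwise (· < ·) := by
  induction xs generalizing s with
  | nil => simp [G]
  | cons m rest ih =>
    simp only [G]
    split
    · exact List.Pairwise.cons (fun y hy => by have := G_ge L rest (s + 1) y hy; omega) (ih (s + 1))
    · exact ih (s + 1)

theorem mem_G (L : Int) (xs : List (List (String × String))) (s : Int) (i : Int) :
    i ∈ G L xs s ↔ ∃ j : Nat, ∃ h : j < xs.length, i = s + j ∧ isRole xs[j] "tool" = true ∧ i < L := by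
  induction xs generalizing s with
  | nil => simp [G]
  | cons m rest ih =>
    simp only [G]
    by_cases hc : (isRole m "tool" && decide (s < L)) = true
    · rw [if_pos hc]
      simp only [Bool.and_eq_true, decide_eq_true_eq] at hc
      constructor
      · intro hi
        rcases List.mem_cons.mp hi with rfl | hi
        · exact ⟨0, by simp only [List.length_cons]; omega, by simp, by simpa using hc.1, hc.2⟩
        · obtain ⟨j, hj, hij, ht, hl⟩ := (ih (s + 1)).mp hi
          exact ⟨j + 1, by simp only [List.length_cons]; omega,
            by push_cast at hij ⊢; omega, by simpa using ht, hl⟩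
      · rintro ⟨j, hj, hij, ht, hl⟩
        cases j with
        | zero => simp [hij]
        | succ j' =>
          apply List.mem_cons_of_mem
          refine (ih (s + 1)).mpr ⟨j', by simp only [List.length_cons] at hj; omega,
            by push_cast at hij ⊢; omega, by simpa using ht, hl⟩
    · rw [if_neg hc]
      rw [ih (s + 1)]
      constructor
      · rintro ⟨j, hj, hij, ht, hl⟩
        exact ⟨j + 1, by simp only [List.length_cons]; omega,
          by push_cast at hij ⊢; omega, by simpa using ht, hl⟩
      · rintro ⟨j, hj, hij, ht, hl⟩
        cases j with
        | zero =>
          exfalso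
          apply hc
          simp only [Bool.and_eq_true, decide_eq_true_eq]
          refine ⟨by simpa using ht, ?_⟩
          simp only [Nat.cast_zero, add_zero] at hij
          omega
        | succ j' =>
          exact ⟨j', by simp only [List.length_cons] at hj; omega,
            by push_cast at hij ⊢; omega, by simpa using ht, hl⟩

theorem G_empty (L : Int) (xs : List (List (String × String))) (s : Int) (h : L ≤ s) : G L xs s = [] := by
  induction xs generalizing s with
  | nil => rfl
  | cons m rest ih =>
    simp only [G]
    rw [if_neg (by
      simp only [Bool.and_eq_true, decide_eq_true_eq, not_and]
      intro _
      omega)]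
    exact ih (s + 1) (by omega)

theorem filter_G_all (L : Int) (xs : List (List (String × String))) (s t : Int) (h : t ≤ s) :
    (G L xs s).filter (fun y => decide (t ≤ y)) = G L xs s := by
  apply List.filter_eq_self.mpr
  intro y hy
  have := G_ge L xs s y hy
  simp only [decide_eq_true_eq]
  omega

theorem filter_G (L : Int) (xs : List (List (String × String))) (s : Int) (d : Nat) :
    (G L xs s).filter (fun y => decide (s + d ≤ y)) = G L (xs.drop d) (s + d) := by
  induction xs generalizing s d with
  | nil => simp [G]
  | cons m rest ih =>
    cases d with
    | zero =>
      simp only [Nat.cast_zero, add_zero, List.drop_zero]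
      exact filter_G_all L (m :: rest) s s le_rfl
    | succ d =>
      rw [List.drop_succ_cons]
      simp only [G]
      have hpred : (fun y => decide (s + ((d + 1 : Nat) : Int) ≤ y)) =
          (fun y => decide ((s + 1) + (d : Int) ≤ y)) := by
        funext y
        exact decide_eq_decide.mpr (by push_cast; constructor <;> intro <;> omega)
      split
      · rw [List.filter_cons_of_neg (by simp only [decide_eq_true_eq]; push_cast; omega)]
        rw [hpred, ih (s + 1) d]
        congr 1
        push_cast
        ring
      · rw [hpred, ih (s + 1) d]
        congr 1
        push_cast
        ring

theorem length_G (xs : List (List (String × String))) (s : Int) (h : hasAsst xs = true) :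
    (G (s + specLast xs) xs s).length = fcount xs := by
  induction xs generalizing s with
  | nil => simp [hasAsst] at h
  | cons m rest ih =>
    by_cases hr : hasAsst rest = true
    · have hnn := specLast_nonneg rest hr
      simp only [specLast, hr, if_true]
      have harith : s + (specLast rest + 1) = (s + 1) + specLast rest := by ring
      rw [harith]
      simp only [G]
      by_cases ht : isRole m "tool" = true
      · rw [if_pos (by simp only [ht, Bool.true_and, decide_eq_true_eq]; omega)]
        simp only [List.length_cons, ih (s + 1) hr, fcount, hr, if_true, ht, if_true]
      · have ht' : isRole m "tool" = false := by simpa using ht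
        rw [if_neg (by simp [ht'])]
        simp only [ih (s + 1) hr, fcount, hr, if_true, ht', Bool.false_eq_true, if_false,
          add_zero]
    · simp only [Bool.not_eq_true] at hr
      have hm : isRole m "assistant" = true := by
        simp only [hasAsst, List.any_cons] at h
        rcases Bool.or_eq_true_iff.mp h with h1 | h1
        · exact h1
        · rw [show (rest.any fun m => isRole m "assistant") = hasAsst rest from rfl, hr] at h1
          cases h1
      simp only [specLast, hr, Bool.false_eq_true, if_false, hm, if_true, add_zero, G]
      rw [if_neg (by simp)]
      rw [G_empty _ _ _ (by omega)]
      simp [fcount, hr]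

-- ---- take on a sorted list ----
theorem mem_take_sorted (l : List Int) (t : Nat) (x : Int) (hp : l.Pairwise (· < ·)) :
    x ∈ l.take t ↔ x ∈ l ∧ l.length ≤ t + (l.filter (fun y => decide (x < y))).length := by
  induction l generalizing t with
  | nil => simp
  | cons a rest ih =>
    have ha : ∀ y ∈ rest, a < y := fun y hy => List.rel_of_pairwise_cons hp hy
    have hp' : rest.Pairwise (· < ·) := hp.of_cons
    cases t with
    | zero =>
      simp only [List.take_zero, List.not_mem_nil, false_iff, not_and, not_le, Nat.zero_add]
      intro hx
      rw [List.length_filter_lt_length_iff_exists]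
      exact ⟨x, hx, by simp⟩
    | succ t =>
      rw [List.take_succ_cons]
      by_cases hxa : x = a
      · subst hxa
        have hfilter : List.filter (fun y => decide (x < y)) (x :: rest) = rest := by
          rw [List.filter_cons_of_neg (by simp)]
          exact List.filter_eq_self.mpr (fun y hy => by simpa using ha y hy)
        constructor
        · intro _
          refine ⟨by simp, ?_⟩
          rw [hfilter]
          simp only [List.length_cons]
          omega
        · intro _
          simp
      · by_cases hxr : x ∈ rest
        · have hax : a < x := ha x hxr
          rw [List.filter_cons_of_neg (by simp; omega)]
          simp only [List.mem_cons, hxa, false_or, List.length_cons]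
          rw [ih t hp']
          constructor
          · rintro ⟨h1, h2⟩; exact ⟨h1, by omega⟩
          · rintro ⟨h1, h2⟩; exact ⟨h1, by omega⟩
        · constructor
          · intro hmem
            rcases List.mem_cons.mp hmem with h1 | h1
            · exact absurd h1 hxa
            · exact absurd (List.mem_of_mem_take h1) hxr
          · rintro ⟨hmem, -⟩
            rcases List.mem_cons.mp hmem with h1 | h1
            · exact absurd h1 hxa
            · exact absurd h1 hxr

-- ---- the clearing foldl, pointwise ----
theorem clearStep_eq (acc : List (List (String × String))) (idx : Int)
    (h0 : 0 ≤ idx) (hl : idx < (acc.length : Int)) :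
    clearStep acc idx =
      if pvGet (acc[idx.toNat]'(by omega)) "content" ≠ some "[Old tool result cleared]"
      then acc.set idx.toNat (pvClear (acc[idx.toNat]'(by omega)))
      else acc := by
  unfold clearStep
  rw [PySem.List.pyGet?_eq_some_getElem acc h0 hl]
  simp only []
  split
  · rw [PySem.List.pySetD_of_nonneg acc _ h0]
  · rfl

theorem length_clearStep (acc : List (List (String × String))) (idx : Int) :
    (clearStep acc idx).length = acc.length := by
  unfold clearStep
  cases hg : PySem.List.pyGet? acc idx with
  | none => rfl
  | some m =>
    simp only []
    split
    · exact PySem.List.length_pySetD acc idx (pvClear m)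
    · rfl

theorem foldl_clearStep (idxs : List Int) (l : List (List (String × String)))
    (hnd : idxs.Nodup) (hr : ∀ i ∈ idxs, 0 ≤ i ∧ i < (l.length : Int)) :
    ∀ j : Nat, (idxs.foldl clearStep l)[j]? =
      (l[j]?).map (fun m =>
        if (j : Int) ∈ idxs ∧ pvGet m "content" ≠ some "[Old tool result cleared]"
        then pvClear m else m) := by
  induction idxs generalizing l with
  | nil =>
    intro j
    simp
  | cons i rest ih =>
    intro j
    have hi := hr i (by simp)
    have hlen : (clearStep l i).length = l.length := length_clearStep l i
    have hrest : ∀ x ∈ rest, 0 ≤ x ∧ x < ((clearStep l i).length : Int) := by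
      intro x hx
      rw [hlen]
      exact hr x (by simp [hx])
    have hnotmem : i ∉ rest := (List.nodup_cons.mp hnd).1
    rw [List.foldl_cons, ih (clearStep l i) (List.Nodup.of_cons hnd) hrest j]
    have hcs := clearStep_eq l i hi.1 hi.2
    have hiN : i.toNat < l.length := by omega
    by_cases hji : j = i.toNat
    · subst hji
      have hji' : ((i.toNat : Nat) : Int) = i := by omega
      have hget : (clearStep l i)[i.toNat]? =
          some (if pvGet (l[i.toNat]'hiN) "content" ≠ some "[Old tool result cleared]"
                then pvClear (l[i.toNat]'hiN) else l[i.toNat]'hiN) := by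
        rw [hcs]
        split
        · rw [List.getElem?_set_self (by simpa using hiN)]
        · simp [List.getElem?_eq_getElem hiN]
      rw [hget, List.getElem?_eq_getElem hiN]
      simp only [Option.map_some]
      congr 1
      have hjrest : ((i.toNat : Nat) : Int) ∉ rest := by rw [hji']; exact hnotmem
      by_cases hg : pvGet (l[i.toNat]'hiN) "content" ≠ some "[Old tool result cleared]"
      · rw [if_pos hg, if_neg (by rintro ⟨h1, -⟩; exact hjrest h1),
          if_pos ⟨by rw [hji']; simp, hg⟩]
      · rw [if_neg hg, if_neg (by rintro ⟨-, h⟩; exact hg h),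
          if_neg (by rintro ⟨-, h⟩; exact hg h)]
    · have hget : (clearStep l i)[j]? = l[j]? := by
        rw [hcs]
        split
        · exact List.getElem?_set_ne (by omega)
        · rfl
      rw [hget]
      have hmem : ((j : Int) ∈ i :: rest) ↔ (j : Int) ∈ rest := by
        simp only [List.mem_cons, or_iff_right_iff_imp]
        intro h
        exact absurd (by omega : j = i.toNat) hji
      cases hlj : l[j]? with
      | none => rfl
      | some m =>
        simp only [Option.map_some]
        congr 1
        by_cases hc : (j : Int) ∈ rest ∧ pvGet m "content" ≠ some "[Old tool result cleared]"
        · rw [if_pos hc, if_pos ⟨hmem.mpr hc.1, hc.2⟩]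
        · rw [if_neg hc, if_neg (by rintro ⟨h1, h2⟩; exact hc ⟨hmem.mp h1, h2⟩)]

-- ---- S pointwise ----
theorem S_getElem? (k : Int) (xs : List (List (String × String))) (j : Nat) :
    (S k xs)[j]? = (xs[j]?).map (fun m => if clearCond k m (xs.drop (j + 1)) then pvClear m else m) := by
  induction xs generalizing j with
  | nil => simp [S]
  | cons m rest ih =>
    cases j with
    | zero => simp [S]
    | succ j' =>
      simp only [S, List.getElem?_cons_succ, List.drop_succ_cons]
      exact ih j'

-- ---- counting bridges ----
theorem fcount_eq_filter (xs : List (List (String × String))) (j : Nat)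
    (ha : hasAsst (xs.drop (j + 1)) = true) :
    ((G (specLast xs) xs 0).filter (fun y => decide ((j : Int) < y))).length = fcount (xs.drop (j + 1)) := by
  have hpred : (fun y => decide ((j : Int) < y)) =
      (fun y => decide ((0 : Int) + ((j + 1 : Nat) : Int) ≤ y)) := by
    funext y
    exact decide_eq_decide.mpr (by push_cast; constructor <;> intro <;> omega)
  rw [hpred, filter_G (specLast xs) xs 0 (j + 1)]
  have hsd := specLast_drop (j + 1) xs ha
  have hth : specLast xs = (0 + ((j + 1 : Nat) : Int)) + specLast (xs.drop (j + 1)) := by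
    push_cast at hsd ⊢
    omega
  rw [hth, length_G (xs.drop (j + 1)) _ ha]

theorem clearCond_false_of_le (xs : List (List (String × String))) (k : Int) (j : Nat)
    (h : j < xs.length) (hb : ((G (specLast xs) xs 0).length : Int) ≤ k) :
    clearCond k (xs[j]) (xs.drop (j + 1)) = false := by
  by_contra hc
  rw [Bool.not_eq_false] at hc
  simp only [clearCond, Bool.and_eq_true, decide_eq_true_eq] at hc
  obtain ⟨⟨⟨ha, ht⟩, hk⟩, hg⟩ := hc
  have hmem : (j : Int) ∈ G (specLast xs) xs 0 :=
    (mem_G _ xs 0 j).mpr ⟨j, h, by simp, ht, (hasAsst_drop_iff xs j).mp ha⟩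
  have hflt : ((G (specLast xs) xs 0).filter (fun y => decide ((j : Int) < y))).length <
      (G (specLast xs) xs 0).length := by
    rw [List.length_filter_lt_length_iff_exists]
    exact ⟨_, hmem, by simp⟩
  rw [fcount_eq_filter xs j ha] at hflt
  omega

theorem cond_iff (xs : List (List (String × String))) (k : Int) (j : Nat) (h : j < xs.length)
    (hb : k < ((G (specLast xs) xs 0).length : Int)) :
    ((j : Int) ∈ (G (specLast xs) xs 0).take (((G (specLast xs) xs 0).length : Int) - k).toNat
      ∧ pvGet (xs[j]) "content" ≠ some "[Old tool result cleared]")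
    ↔ clearCond k (xs[j]) (xs.drop (j + 1)) = true := by
  rw [mem_take_sorted _ _ _ (G_pairwise (specLast xs) xs 0)]
  constructor
  · rintro ⟨⟨hmem, hcnt⟩, hg⟩
    obtain ⟨j', hj', hij, ht, hl⟩ := (mem_G _ xs 0 (j : Int)).mp hmem
    have hjj : j = j' := by omega
    subst hjj
    have ha : hasAsst (xs.drop (j + 1)) = true := (hasAsst_drop_iff xs j).mpr hl
    have hfe := fcount_eq_filter xs j ha
    simp only [clearCond, ha, ht, Bool.true_and, Bool.and_eq_true, decide_eq_true_eq, bne_iff_ne]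
    exact ⟨by omega, hg⟩
  · intro hc
    simp only [clearCond, Bool.and_eq_true, decide_eq_true_eq, bne_iff_ne] at hc
    obtain ⟨⟨⟨ha, ht⟩, hk⟩, hg⟩ := hc
    have hl : (j : Int) < specLast xs := (hasAsst_drop_iff xs j).mp ha
    have hmem : (j : Int) ∈ G (specLast xs) xs 0 :=
      (mem_G _ xs 0 j).mpr ⟨j, h, by simp, ht, hl⟩
    have hfe := fcount_eq_filter xs j ha
    exact ⟨⟨hmem, by omega⟩, hg⟩

-- ---- assembly ----
theorem A_eq_S (xs : List (List (String × String))) (k : Int) : micro_compact xs k = S k xs := by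
  unfold micro_compact
  simp only [lastLoop_eq, enum_filter_eq_G]
  by_cases hb : ((G (specLast xs) xs 0).length : Int) ≤ k
  · rw [if_pos hb]
    apply List.ext_getElem?
    intro j
    rw [S_getElem? k xs j]
    cases hx : xs[j]? with
    | none => rfl
    | some m =>
      have hj : j < xs.length := by
        by_contra hcon
        rw [List.getElem?_eq_none (by omega)] at hx
        cases hx
      have hm : m = xs[j] := by
        rw [List.getElem?_eq_getElem hj] at hx
        exact (Option.some_inj.mp hx).symm
      subst hm
      simp only [Option.map_some]
      rw [clearCond_false_of_le xs k j hj hb]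
      simp
  · rw [if_neg hb]
    rw [not_le] at hb
    rw [PySem.List.slice_to _ (by omega : (0:Int) ≤ ((G (specLast xs) xs 0).length : Int) - k)]
    apply List.ext_getElem?
    intro j
    have hnd : ((G (specLast xs) xs 0).take
        (((G (specLast xs) xs 0).length : Int) - k).toNat).Nodup :=
      (((G_pairwise (specLast xs) xs 0).sublist (List.take_sublist _ _)).imp
        (fun {a b} hab => ne_of_lt hab))
    have hrng : ∀ i ∈ (G (specLast xs) xs 0).take
        (((G (specLast xs) xs 0).length : Int) - k).toNat, 0 ≤ i ∧ i < (xs.length : Int) := by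
      intro i hi
      obtain ⟨j', hj', hij, -, -⟩ := (mem_G _ xs 0 i).mp (List.mem_of_mem_take hi)
      omega
    rw [foldl_clearStep _ xs hnd hrng j, S_getElem? k xs j]
    cases hx : xs[j]? with
    | none => rfl
    | some m =>
      have hj : j < xs.length := by
        by_contra hcon
        rw [List.getElem?_eq_none (by omega)] at hx
        cases hx
      have hm : m = xs[j] := by
        rw [List.getElem?_eq_getElem hj] at hx
        exact (Option.some_inj.mp hx).symm
      subst hm
      simp only [Option.map_some]
      congr 1
      have hci := cond_iff xs k j hj hb
      by_cases hc : clearCond k (xs[j]) (xs.drop (j + 1)) = true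
      · rw [if_pos hc, if_pos (by
          obtain ⟨h1, h2⟩ := hci.mpr hc
          exact ⟨h1, h2⟩)]
      · rw [if_neg (fun hcc => hc (hci.mp hcc)), if_neg (by simpa using hc)]

-- ===== VERDICT (by name: the statement is the Claim_ definition above) =====
theorem micro_compact_spec : Claim_equal_micro_compact := by
  intro messages keep_recent _
  unfold Spec_micro_compact
  rw [A_eq_S, B_eq_S]
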